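-- pv_equiv track=rewrite | github.com/ellenlodin/Prog2 | VA_files/VA_1.py | zippa
-- ===== SOURCE A (Python) =====
-- def zippa(l1: list, l2: list) -> list:
--     """ Returns a new list from the elements in l1 and l2 like the zip function"""
--     lst1 = l1.copy()
--     lst2 = l2.copy()
--     if not lst1:
--         return lst2
--     elif not lst2:
--         return lst1
--     elif not lst1 and not lst2:
--         return ""
--     else:
--         return [lst1[0] , lst2[0]] + zippa(lst1[1:], lst2[1:])
-- ===== SOURCE B (Python) =====
-- def zippa(l1: list, l2: list) -> list:
--     """Returns a new list from the elements in l1 and l2 like the zip function"""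
--     m = min(len(l1), len(l2))
--     result = []
--     for i in range(m):
--         result.append(l1[i])
--         result.append(l2[i])
--     result.extend(l1[m:] if len(l1) > len(l2) else l2[m:])
--     return result
-- ===== Notes on version B (the rewrite author's own statement) =====
-- stated objective: faster
-- what changed: Replaces A's linear recursion with slice copies at every step by a single iterative forward pass: interleave the first min(len) elements by index, then extend with the leftover tail of the longer list.
import Mathlib
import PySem

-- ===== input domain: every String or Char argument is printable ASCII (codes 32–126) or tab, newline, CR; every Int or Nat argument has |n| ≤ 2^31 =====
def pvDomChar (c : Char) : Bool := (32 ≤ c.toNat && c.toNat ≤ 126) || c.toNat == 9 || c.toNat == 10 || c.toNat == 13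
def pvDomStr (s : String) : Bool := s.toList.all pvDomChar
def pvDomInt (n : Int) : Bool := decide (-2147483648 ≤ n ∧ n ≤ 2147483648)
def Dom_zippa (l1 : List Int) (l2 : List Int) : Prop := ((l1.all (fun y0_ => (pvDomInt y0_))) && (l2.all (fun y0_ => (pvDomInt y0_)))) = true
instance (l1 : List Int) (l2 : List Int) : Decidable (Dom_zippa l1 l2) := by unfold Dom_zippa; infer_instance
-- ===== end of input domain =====

-- ===== PORT A =====
-- Literal transliteration of A's recursion (the .copy() calls have no observable
-- effect on the return value; the unreachable 'not lst1 and not lst2' branch is dead code).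
def zippa (l1 : List Int) (l2 : List Int) : List Int :=
  match l1, l2 with
  | [], lst2 => lst2
  | lst1, [] => lst1
  | x :: xs, y :: ys => [x, y] ++ zippa xs ys

-- ===== PORT B =====
-- Port of B: one forward pass over List.range m, then the leftover tail.
def zippa_alt (l1 : List Int) (l2 : List Int) : List Int :=
  let m := min l1.length l2.length
  let result := (List.range m).foldl (fun acc i => acc ++ [l1.getD i 0, l2.getD i 0]) []
  result ++ (if l1.length > l2.length then l1.drop m else l2.drop m)

-- ===== PRECONDITION & SPEC =====
def Spec_zippa (l1 : List Int) (l2 : List Int) (out : List Int) : Prop := out = zippa_alt l1 l2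
instance (l1 : List Int) (l2 : List Int) (out : List Int) : Decidable (Spec_zippa l1 l2 out) := by unfold Spec_zippa; infer_instance

-- ===== CLAIM (what is proved, stated in full; the proofs are below) =====
def Claim_equal_zippa : Prop := ∀ (l1 : List Int) (l2 : List Int), Dom_zippa l1 l2 → Spec_zippa l1 l2 (zippa l1 l2)

-- ===== LEMMAS AND PROOFS =====

-- ===== VERDICT (by name: the statement is the Claim_ definition above) =====
-- core of B as a flatMap, via the fold-with-append shape
lemma alt_core (l1 l2 : List Int) (m : Nat) :
    (List.range m).foldl (fun acc i => acc ++ [l1.getD i 0, l2.getD i 0]) []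
      = (List.range m).flatMap (fun i => [l1.getD i 0, l2.getD i 0]) := by
  induction m with
  | zero => simp
  | succ n ih => simp [List.range_succ, List.flatMap]

lemma flatMap_shift (a b : Int) (l1 l2 : List Int) (m : Nat) :
    (List.range (m+1)).flatMap (fun i => [(a :: l1).getD i 0, (b :: l2).getD i 0])
      = a :: b :: (List.range m).flatMap (fun i => [l1.getD i 0, l2.getD i 0]) := by
  rw [List.range_succ_eq_map]
  simp [List.flatMap_cons, List.flatMap_map]

lemma zippa_eq_alt (l1 l2 : List Int) : zippa l1 l2 = zippa_alt l1 l2 := by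
  induction l1 generalizing l2 with
  | nil => cases l2 <;> simp [zippa, zippa_alt]

  | cons a as ih =>
    cases l2 with
    | nil => simp [zippa, zippa_alt]
    | cons b bs =>
      simp only [zippa, zippa_alt, alt_core] at *
      have hm : min (a :: as).length (b :: bs).length = min as.length bs.length + 1 := by
        simp [Nat.succ_min_succ]
      rw [hm, flatMap_shift]
      simp only [List.length_cons, List.drop_succ_cons, Nat.add_lt_add_iff_right]
      rw [ih bs]
      simp


theorem zippa_spec : Claim_equal_zippa := by
  intro l1 l2 _
  unfold Spec_zippa
  exact zippa_eq_alt l1 l2
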